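-- pv_equiv track=rewrite | github.com/ltzp/LeetCode | 剑指offer/打印从1到最大的n位数.py | printNumbers
-- ===== SOURCE A (Python) =====
-- def printNumbers(n):
--     """
--     :type n: int
--     :rtype: List[int]
--     """
--     res = []
--     if n == 0:
--         return res
--     cur_num = 1
--     while cur_num < 10 ** n:
--         res.append(cur_num)
--         cur_num +=1
--     return res
-- ===== SOURCE B (Python) =====
-- def printNumbers(n):
--     """
--     :type n: int
--     :rtype: List[int]
--     """
--     res = []
--     if n <= 0:
--         return res
--     # breadth-first by digit length: each level is built from the previous
--     # one by appending one more digit (0-9) to every number in it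
--     level = list(range(1, 10))
--     res.extend(level)
--     for _ in range(n - 1):
--         level = [10 * x + d for x in level for d in range(10)]
--         res.extend(level)
--     return res
-- ===== Notes on version B (the rewrite author's own statement) =====
-- stated objective: alternative
-- what changed: Replaced the incrementing while-loop counter with a breadth-first digit enumeration: numbers are generated level by digit-length, each level built from the previous one by appending a digit 0-9, and the levels concatenated in order.
import Mathlib
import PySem

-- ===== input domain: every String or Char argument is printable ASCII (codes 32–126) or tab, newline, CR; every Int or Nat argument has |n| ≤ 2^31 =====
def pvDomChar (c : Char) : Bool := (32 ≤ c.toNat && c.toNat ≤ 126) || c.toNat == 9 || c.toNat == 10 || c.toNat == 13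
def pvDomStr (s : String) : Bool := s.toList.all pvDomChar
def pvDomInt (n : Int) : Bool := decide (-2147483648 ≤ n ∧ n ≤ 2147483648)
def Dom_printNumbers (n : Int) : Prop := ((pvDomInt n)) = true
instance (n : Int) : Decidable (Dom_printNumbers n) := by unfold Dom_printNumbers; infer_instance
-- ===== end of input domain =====

-- ===== PORT A =====
-- B replaces A's incrementing while-loop counter with a breadth-first digit-by-digit
-- enumeration by levels (alternative algorithm, same cost); return values proved equal.
-- A's loop: while cur_num < 10 ** n: res.append(cur_num); cur_num += 1.
-- For n < 0 Python's 10**n is a float in (0,1), so the condition 1 < 10**n is False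
-- and the loop never runs; on the Int domain that is encoded as the n < 0 branch.
def pvLoopA (bound : Int) (res : List Int) (cur : Int) : List Int :=
  if cur < bound then pvLoopA bound (res ++ [cur]) (cur + 1) else res
termination_by (bound - cur).toNat
decreasing_by omega

def printNumbers (n : Int) : List Int :=
  if n = 0 then []
  else if n < 0 then []  -- loop condition false: 10**n ∈ (0,1) in Python, cur_num = 1
  else pvLoopA (10 ^ n.toNat) [] 1

-- ===== PORT B =====
-- breadth-first by digit length: level k+1 = [10*x + d for x in level k for d in range(10)],
-- the levels concatenated into res in order
def pvExtend (level : List Int) : List Int :=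
  level.flatMap (fun x => (List.range 10).map (fun (d : Nat) => 10 * x + (d : Int)))

def printNumbers_alt (n : Int) : List Int :=
  if n ≤ 0 then []
  else
    let level := PySem.List.pyRange 1 10 1
    ((List.range (n.toNat - 1)).foldl
      (fun (st : List Int × List Int) _ =>
        let lv := pvExtend st.2
        (st.1 ++ lv, lv))
      (([] : List Int) ++ level, level)).1

-- ===== PRECONDITION & SPEC =====
def Spec_printNumbers (n : Int) (out : List Int) : Prop := out = printNumbers_alt n
instance (n : Int) (out : List Int) : Decidable (Spec_printNumbers n out) := by unfold Spec_printNumbers; infer_instance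

-- ===== CLAIM (what is proved, stated in full; the proofs are below) =====
def Claim_equal_printNumbers : Prop := ∀ (n : Int), Dom_printNumbers n → Spec_printNumbers n (printNumbers n)

-- ===== LEMMAS AND PROOFS =====
theorem pvLoopA_eq_pyRange (bound : Int) (res : List Int) (cur : Int) :
    pvLoopA bound res cur = res ++ PySem.List.pyRange cur bound 1 := by
  rw [pvLoopA]
  split
  · rename_i h
    rw [pvLoopA_eq_pyRange bound (res ++ [cur]) (cur + 1),
        PySem.List.pyRange_one_cons h]
    simp
  · rename_i h
    rw [PySem.List.pyRange_one_eq_nil (by omega)]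
    simp
termination_by (bound - cur).toNat
decreasing_by omega

-- appending each digit 0..9 to x yields the contiguous block [10x, 10x+10)
theorem pvExtend_block (x : Int) :
    (List.range 10).map (fun (d : Nat) => 10 * x + (d : Int)) = PySem.List.pyRange (10 * x) (10 * x + 10) 1 := by
  rw [PySem.List.pyRange_one]
  norm_num
  rfl

-- extending a whole range of numbers by one digit yields the tenfold range
theorem pvExtend_pyRange (a b : Int) (h : a ≤ b) :
    pvExtend (PySem.List.pyRange a b 1) = PySem.List.pyRange (10 * a) (10 * b) 1 := by
  rcases lt_or_ge a b with hab | hab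
  · rw [PySem.List.pyRange_one_cons hab]
    unfold pvExtend
    rw [List.flatMap_cons, pvExtend_block]
    have : (PySem.List.pyRange (a + 1) b 1).flatMap
        (fun x => (List.range 10).map (fun (d : Nat) => 10 * x + (d : Int))) =
        pvExtend (PySem.List.pyRange (a + 1) b 1) := rfl
    rw [this, pvExtend_pyRange (a + 1) b (by omega),
        show (10:Int) * (a + 1) = 10 * a + 10 by ring,
        ← PySem.List.pyRange_one_append (10 * a) (10 * a + 10) (10 * b)
          (by omega) (by omega)]
  · rw [PySem.List.pyRange_one_eq_nil hab, PySem.List.pyRange_one_eq_nil (by omega)]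
    rfl
termination_by (b - a).toNat
decreasing_by omega

-- loop invariant: after k iterations res holds [1, 10^(k+1)) and level holds [10^k, 10^(k+1))
theorem pvFold_levels (k : Nat) :
    (List.range k).foldl
      (fun (st : List Int × List Int) _ =>
        let lv := pvExtend st.2
        (st.1 ++ lv, lv))
      (([] : List Int) ++ PySem.List.pyRange 1 10 1, PySem.List.pyRange 1 10 1) =
    (PySem.List.pyRange 1 (10 ^ (k + 1)) 1,
     PySem.List.pyRange (10 ^ k) (10 ^ (k + 1)) 1) := by
  induction k with
  | zero => norm_num
  | succ k ih =>
      have hP : (0:Int) < 10 ^ k := pow_pos (by norm_num) k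
      have hP1 : (0:Int) < 10 ^ (k + 1) := pow_pos (by norm_num) (k + 1)
      have hs : (10:Int) ^ (k + 1) = 10 ^ k * 10 := pow_succ 10 k
      have hs2 : (10:Int) ^ (k + 1 + 1) = 10 ^ (k + 1) * 10 := pow_succ 10 (k + 1)
      rw [List.range_succ, List.foldl_append, ih, List.foldl_cons, List.foldl_nil]
      simp only
      rw [pvExtend_pyRange _ _ (by nlinarith),
          show (10:Int) * 10 ^ k = 10 ^ (k + 1) by rw [hs]; ring,
          show (10:Int) * 10 ^ (k + 1) = 10 ^ (k + 1 + 1) by rw [hs2]; ring,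
          ← PySem.List.pyRange_one_append 1 (10 ^ (k + 1)) (10 ^ (k + 1 + 1))
              (by omega) (by nlinarith)]

-- ===== VERDICT (by name: the statement is the Claim_ definition above) =====
theorem printNumbers_spec : Claim_equal_printNumbers := by
  intro n _
  unfold Spec_printNumbers printNumbers printNumbers_alt
  split
  · rename_i h; rw [if_pos (by omega)]
  · split
    · rename_i h h'; rw [if_pos (by omega)]
    · rename_i h h'
      rw [if_neg (by omega), pvLoopA_eq_pyRange]
      simp only
      rw [pvFold_levels (n.toNat - 1),
          show n.toNat - 1 + 1 = n.toNat by omega]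
      simp
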